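-- pv_equiv track=rewrite | github.com/gofarrrr/lolla2 | src/academy/navigator/runtime.py | _suggest_application_sequence
-- ===== SOURCE A (Python) =====
-- from typing import Any, Dict, List, Optional
--
-- def _suggest_application_sequence(models: List[Dict[str, Any]]) -> List[str]:
--     """Suggest optimal sequence for applying mental models"""
--     # Simple heuristic: foundation models first, then analysis, then decision
--     foundation_models = []
--     analysis_models = []
--     decision_models = []
--
--     for model in models:
--         name = model['title'].lower()
--         if any(word in name for word in ['first principles', 'systems', 'fundamental']):
--             foundation_models.append(model['title'])
--         elif any(word in name for word in ['bias', 'assumption', 'analysis']):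
--             analysis_models.append(model['title'])
--         else:
--             decision_models.append(model['title'])
--
--     return foundation_models + analysis_models + decision_models
-- ===== SOURCE B (Python) =====
-- def _suggest_application_sequence(models):
--     def rank(model):
--         name = model['title'].lower()
--         if any(word in name for word in ['first principles', 'systems', 'fundamental']):
--             return 0
--         if any(word in name for word in ['bias', 'assumption', 'analysis']):
--             return 1
--         return 2
--     return [m['title'] for m in sorted(models, key=rank)]
-- ===== Notes on version B (the rewrite author's own statement) =====
-- stated objective: simpler
-- what changed: Replaces the three explicit bucket lists and their concatenation with a single stable sort by a 0/1/2 category rank followed by one title-extraction comprehension.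
import Mathlib
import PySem

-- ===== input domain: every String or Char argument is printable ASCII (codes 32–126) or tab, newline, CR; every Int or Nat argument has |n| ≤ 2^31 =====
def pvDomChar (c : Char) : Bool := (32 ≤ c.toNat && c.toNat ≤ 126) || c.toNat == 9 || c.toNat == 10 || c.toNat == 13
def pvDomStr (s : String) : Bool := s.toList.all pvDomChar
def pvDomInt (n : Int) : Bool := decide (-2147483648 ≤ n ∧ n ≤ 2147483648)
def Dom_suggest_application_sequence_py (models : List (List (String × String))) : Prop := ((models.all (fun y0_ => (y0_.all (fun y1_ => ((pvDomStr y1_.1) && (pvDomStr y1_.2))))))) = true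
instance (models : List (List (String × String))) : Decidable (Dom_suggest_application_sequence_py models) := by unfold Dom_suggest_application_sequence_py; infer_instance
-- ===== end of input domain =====

-- B replaces A's three bucket lists with a stable sort by a 0/1/2 category rank (simpler, not faster).

-- shared helpers: model['title'] (total form, used under Pre_) and the two keyword tests
def titleOf (m : List (String × String)) : String := (PySem.Dict.mk m).getD "title" ""

def isFoundation (name : String) : Bool :=
  (["first principles", "systems", "fundamental"] : List String).any (fun w => PySem.Str.isIn w name)

def isAnalysis (name : String) : Bool :=
  (["bias", "assumption", "analysis"] : List String).any (fun w => PySem.Str.isIn w name)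

-- ===== PORT A =====
def suggest_application_sequence_py (models : List (List (String × String))) : List String :=
  let r := models.foldl
    (fun (acc : List String × List String × List String) model =>
      let name := PySem.Str.lower (titleOf model)
      if isFoundation name then (acc.1 ++ [titleOf model], acc.2.1, acc.2.2)
      else if isAnalysis name then (acc.1, acc.2.1 ++ [titleOf model], acc.2.2)
      else (acc.1, acc.2.1, acc.2.2 ++ [titleOf model]))
    ([], [], [])
  r.1 ++ r.2.1 ++ r.2.2

-- ===== PORT B =====
def rankOf (model : List (String × String)) : Nat :=
  let name := PySem.Str.lower (titleOf model)
  if isFoundation name then 0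
  else if isAnalysis name then 1
  else 2

def suggest_application_sequence_py_alt (models : List (List (String × String))) : List String :=
  (PySem.List.sorted models rankOf).map titleOf

-- ===== PRECONDITION & SPEC =====
-- Pre_ excludes exactly the inputs on which Python A raises KeyError: a model with no 'title' key.
def Pre_suggest_application_sequence_py (models : List (List (String × String))) : Prop :=
  (models.all (fun m => m.any (fun p => p.1 == "title"))) = true

instance (models : List (List (String × String))) : Decidable (Pre_suggest_application_sequence_py models) := by
  unfold Pre_suggest_application_sequence_py; infer_instance

def pvWitness_suggest_application_sequence_py : (List (List (String × String))) :=
  [[("title", "Confirmation Bias")], [("title", "Systems Thinking")], [("title", "Occam's Razor")]]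

def Spec_suggest_application_sequence_py (models : List (List (String × String))) (out : List String) : Prop := out = suggest_application_sequence_py_alt models
instance (models : List (List (String × String))) (out : List String) : Decidable (Spec_suggest_application_sequence_py models out) := by unfold Spec_suggest_application_sequence_py; infer_instance

-- ===== CLAIM (what is proved, stated in full; the proofs are below) =====
def Claim_equal_suggest_application_sequence_py : Prop := ∀ (models : List (List (String × String))), Dom_suggest_application_sequence_py models → Pre_suggest_application_sequence_py models → Spec_suggest_application_sequence_py models (suggest_application_sequence_py models)

-- ===== LEMMAS AND PROOFS =====

-- the three buckets, as filters by rank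
def bucket (i : Nat) (models : List (List (String × String))) : List (List (String × String)) :=
  models.filter (fun m => rankOf m == i)

lemma rank_of_mem_bucket {i : Nat} {m : List (String × String)}
    {models : List (List (String × String))} (h : m ∈ bucket i models) : rankOf m = i := by
  have := (List.mem_filter.mp h).2
  simpa using this

-- A's fold maintains the three buckets
lemma foldA_eq (models : List (List (String × String)))
    (a b c : List String) :
    models.foldl
      (fun (acc : List String × List String × List String) model =>
        let name := PySem.Str.lower (titleOf model)
        if isFoundation name then (acc.1 ++ [titleOf model], acc.2.1, acc.2.2)
        else if isAnalysis name then (acc.1, acc.2.1 ++ [titleOf model], acc.2.2)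
        else (acc.1, acc.2.1, acc.2.2 ++ [titleOf model]))
      (a, b, c)
      = (a ++ (bucket 0 models).map titleOf,
         b ++ (bucket 1 models).map titleOf,
         c ++ (bucket 2 models).map titleOf) := by
  induction models generalizing a b c with
  | nil => simp [bucket]
  | cons m ms ih =>
    simp only [List.foldl_cons]
    by_cases h0 : isFoundation (PySem.Str.lower (titleOf m))
    · simp [bucket, rankOf, h0, ih, List.append_assoc]
    · by_cases h1 : isAnalysis (PySem.Str.lower (titleOf m))
      · simp [bucket, rankOf, h0, h1, ih, List.append_assoc]
      · simp [bucket, rankOf, h0, h1, ih, List.append_assoc]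

-- insertBy skips a prefix it is not placed before
lemma insertBy_append_not {α : Type} (before : α → α → Bool) (x : α)
    (p q : List α) (h : ∀ y ∈ p, before x y = false) :
    PySem.List.insertBy before x (p ++ q) = p ++ PySem.List.insertBy before x q := by
  induction p with
  | nil => simp
  | cons y ys ih =>
    have hy : before x y = false := h y (by simp)
    simp only [List.cons_append, PySem.List.insertBy, hy]
    simp only [Bool.false_eq_true, if_false]
    rw [ih (fun z hz => h z (by simp [hz]))]

-- insertBy goes to the very front when it precedes everything
lemma insertBy_all_before {α : Type} (before : α → α → Bool) (x : α)
    (q : List α) (h : ∀ y ∈ q, before x y = true) :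
    PySem.List.insertBy before x q = x :: q := by
  cases q with
  | nil => simp [PySem.List.insertBy]
  | cons y ys => simp [PySem.List.insertBy, h y (by simp)]

-- B's stable sort produces exactly the bucket concatenation
lemma sorted_eq_buckets (models : List (List (String × String))) :
    PySem.List.sorted models rankOf
      = bucket 0 models ++ bucket 1 models ++ bucket 2 models := by
  rw [PySem.List.sorted_eq_foldl_insertBy]
  induction models using List.reverseRecOn with
  | nil => simp [bucket]
  | append_singleton ms x ih =>
    rw [List.foldl_append, List.foldl_cons, List.foldl_nil, ih]
    have hb : ∀ i (y : List (String × String)), y ∈ bucket i ms → rankOf y = i :=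
      fun i y hy => rank_of_mem_bucket hy
    have hrx : rankOf x = 0 ∨ rankOf x = 1 ∨ rankOf x = 2 := by
      simp only [rankOf]; split_ifs <;> simp
    rcases hrx with hr | hr | hr
    · rw [List.append_assoc,
        insertBy_append_not _ x (bucket 0 ms) _
          (fun y hy => by simp [hb 0 y hy, hr]),
        insertBy_all_before _ x _
          (fun y hy => by
            rcases List.mem_append.mp hy with hy | hy
            · simp [hb 1 y hy, hr]
            · simp [hb 2 y hy, hr])]
      simp [bucket, List.filter_append, hr, List.append_assoc]
    · rw [insertBy_append_not _ x (bucket 0 ms ++ bucket 1 ms) _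
          (fun y hy => by
            rcases List.mem_append.mp hy with hy | hy
            · simp [hb 0 y hy, hr]
            · simp [hb 1 y hy, hr]),
        insertBy_all_before _ x _ (fun y hy => by simp [hb 2 y hy, hr])]
      simp [bucket, List.filter_append, hr, List.append_assoc]
    · rw [PySem.List.insertBy_of_forall_not_before _ x _
          (fun y hy => by
            rcases List.mem_append.mp hy with hy | hy
            · rcases List.mem_append.mp hy with hy | hy
              · simp [hb 0 y hy, hr]
              · simp [hb 1 y hy, hr]
            · simp [hb 2 y hy, hr])]
      simp [bucket, List.filter_append, hr, List.append_assoc]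

-- ===== VERDICT (by name: the statement is the Claim_ definition above) =====
theorem suggest_application_sequence_py_spec : Claim_equal_suggest_application_sequence_py := by
  intro models _ _
  show _ = _
  unfold suggest_application_sequence_py suggest_application_sequence_py_alt
  rw [foldA_eq, sorted_eq_buckets]
  simp
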